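-- pv_equiv track=rewrite | github.com/DaffaEA/KodeKripto | kasiskikey.py | find_vigenere_key
-- ===== SOURCE A (Python) =====
-- def find_vigenere_key(plaintext, ciphertext):
--     key = []
--     for p, c in zip(plaintext, ciphertext):
--         if p.isalpha() and c.isalpha():
--             shift = (ord(c.upper()) - ord(p.upper())) % 26
--             key.append(chr(shift + ord('A')))
--         else:
--             key.append(' ')  # Preserve spaces or non-alphabet characters
--
--     # Extract the repeating pattern of the key
--     key_str = ''.join(key).replace(' ', '')
--     for i in range(1, len(key_str)):
--         if key_str[:i] == key_str[i:2*i]: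
--             return key_str[:i]
--
--     return key_str  # Return full key if no repeating pattern is found
-- ===== SOURCE B (Python) =====
-- def find_vigenere_key(plaintext, ciphertext):
--     key_str = ''.join(
--         chr((ord(c.upper()) - ord(p.upper())) % 26 + ord('A'))
--         for p, c in zip(plaintext, ciphertext)
--         if p.isalpha() and c.isalpha()
--     )
--     n = len(key_str)
--     z = [0] * n
--     l = r = 0
--     for i in range(1, n):
--         k = min(z[i - l], r - i) if i < r else 0
--         while i + k < n and key_str[k] == key_str[i + k]:
--             k += 1
--         z[i] = k
--         if r < i + k:
--             l, r = i, i + k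
--         if k >= i:
--             return key_str[:i]
--     return key_str
-- ===== Notes on version B (the rewrite author's own statement) =====
-- stated objective: faster
-- what changed: Replaces the quadratic scan that re-slices and re-compares the key prefix for every candidate period with a one-pass Z-algorithm: the first index i whose Z-value reaches i is the period; the key itself is built by a direct filtering comprehension instead of appending placeholder spaces and stripping them afterwards.
import Mathlib
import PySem

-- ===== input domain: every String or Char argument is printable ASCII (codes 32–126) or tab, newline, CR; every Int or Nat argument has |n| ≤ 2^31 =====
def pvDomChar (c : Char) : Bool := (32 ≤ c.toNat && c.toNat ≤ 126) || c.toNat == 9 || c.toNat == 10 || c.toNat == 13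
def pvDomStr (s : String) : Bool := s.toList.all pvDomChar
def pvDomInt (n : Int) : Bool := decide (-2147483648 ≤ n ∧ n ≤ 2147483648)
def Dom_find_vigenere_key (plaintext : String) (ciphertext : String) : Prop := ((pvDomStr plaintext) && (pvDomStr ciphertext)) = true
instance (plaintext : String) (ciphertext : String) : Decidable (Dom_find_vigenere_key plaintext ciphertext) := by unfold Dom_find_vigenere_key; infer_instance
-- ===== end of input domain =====

-- B replaces A's quadratic slice-and-compare period search with a one-pass Z-algorithm; same return value on every input.

-- ===== PORT A =====
-- chr((ord(c.upper()) - ord(p.upper())) % 26 + ord('A'))  (identical subexpression of both sources)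
def pvShift (p c : Char) : Char :=
  Char.ofNat ((PySem.Int.mod (((PySem.Chars.upperChar c).toNat : Int) - ((PySem.Chars.upperChar p).toNat : Int)) 26 + 65).toNat)

-- for p, c in zip(plaintext, ciphertext): if ... key.append(chr(...)) else key.append(' ')
def pvKeyLoopA : List (Char × Char) → List Char → List Char
  | [], key => key
  | (p, c) :: rest, key =>
    if PySem.Chars.isalpha p && PySem.Chars.isalpha c then
      pvKeyLoopA rest (key ++ [pvShift p c])
    else
      pvKeyLoopA rest (key ++ [' '])

-- for i in range(1, len(key_str)): if key_str[:i] == key_str[i:2*i]: return key_str[:i]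
def pvScanA (s : List Char) : List Int → String
  | [] => String.ofList s
  | i :: rest =>
    if PySem.List.slice s none (some i) = PySem.List.slice s (some i) (some (2 * i)) then
      String.ofList (PySem.List.slice s none (some i))
    else pvScanA s rest

def find_vigenere_key (plaintext : String) (ciphertext : String) : String :=
  let key := pvKeyLoopA (plaintext.toList.zip ciphertext.toList) []
  let key_str := PySem.Chars.replace key [' '] []
  pvScanA key_str (PySem.List.pyRange 1 (key_str.length : Int))

-- ===== PORT B =====
-- the filtering generator expression building key_str
def pvKeyB (pcs : List (Char × Char)) : List Char :=
  pcs.filterMap (fun pc =>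
    if PySem.Chars.isalpha pc.1 && PySem.Chars.isalpha pc.2 then some (pvShift pc.1 pc.2) else none)

-- while i + k < n and key_str[k] == key_str[i + k]: k += 1
def pvZext (s : List Char) (i : Nat) (k : Nat) : Nat :=
  if h : i + k < s.length ∧ s.getD k ' ' = s.getD (i + k) ' ' then pvZext s i (k + 1) else k
termination_by s.length - (i + k)
decreasing_by omega

-- for i in range(1, n): k = min(z[i-l], r-i) if i < r else 0; extend; z[i] = k; maybe l, r = i, i+k; if k >= i: return key_str[:i]
def pvZloop (s : List Char) (z : List Nat) (l r i : Nat) : String :=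
  if hin : i < s.length then
    let k0 := if i < r then min (PySem.List.pyGetD z ((i - l : Nat) : Int) 0) (r - i) else 0
    let k := pvZext s i k0
    let z' := PySem.List.pySetD z (i : Int) k
    let lr := if r < i + k then (i, i + k) else (l, r)
    if i ≤ k then String.ofList (s.take i)
    else pvZloop s z' lr.1 lr.2 (i + 1)
  else String.ofList s
termination_by s.length - i
decreasing_by omega

def find_vigenere_key_alt (plaintext : String) (ciphertext : String) : String :=
  let s := pvKeyB (plaintext.toList.zip ciphertext.toList)
  pvZloop s (List.replicate s.length 0) 0 0 1

-- ===== PRECONDITION & SPEC =====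
def Spec_find_vigenere_key (plaintext : String) (ciphertext : String) (out : String) : Prop := out = find_vigenere_key_alt plaintext ciphertext
instance (plaintext : String) (ciphertext : String) (out : String) : Decidable (Spec_find_vigenere_key plaintext ciphertext out) := by unfold Spec_find_vigenere_key; infer_instance

-- ===== CLAIM (what is proved, stated in full; the proofs are below) =====
def Claim_equal_find_vigenere_key : Prop := ∀ (plaintext : String) (ciphertext : String), Dom_find_vigenere_key plaintext ciphertext → Spec_find_vigenere_key plaintext ciphertext (find_vigenere_key plaintext ciphertext)

-- ===== LEMMAS AND PROOFS =====

-- longest common prefix length; pvZ is the Z-function specification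
def pvLcp : List Char → List Char → Nat
  | a :: as, b :: bs => if a = b then pvLcp as bs + 1 else 0
  | _, _ => 0

def pvZ (s : List Char) (i : Nat) : Nat := pvLcp s (s.drop i)

-- reference recursion both ports are reduced to: first i ≥ i0 with i ≤ z(i) wins, else the whole string
def pvF (s : List Char) (i : Nat) : String :=
  if i < s.length then
    if i ≤ pvZ s i then String.ofList (s.take i) else pvF s (i + 1)
  else String.ofList s
termination_by s.length - i
decreasing_by omega


theorem pvLcp_le_right : ∀ (a b : List Char), pvLcp a b ≤ b.length
  | [], b => by simp [pvLcp]
  | a :: as, [] => by simp [pvLcp]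
  | a :: as, b :: bs => by
      simp only [pvLcp, List.length_cons]
      split
      · exact Nat.succ_le_succ (pvLcp_le_right as bs)
      · omega

theorem pvLcp_iff_take : ∀ (k : Nat) (a b : List Char),
    k ≤ pvLcp a b ↔ (k ≤ a.length ∧ k ≤ b.length ∧ a.take k = b.take k)
  | 0, a, b => by simp
  | k + 1, [], b => by simp [pvLcp]
  | k + 1, a :: as, [] => by simp [pvLcp]
  | k + 1, a :: as, b :: bs => by
      simp only [pvLcp, List.length_cons, List.take_succ_cons]
      constructor
      · intro h
        split at h
        · next hab =>
            subst hab
            have := (pvLcp_iff_take k as bs).mp (by omega)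
            simp_all
        · omega
      · rintro ⟨h1, h2, h3⟩
        have hab : a = b := by simpa using congrArg (·.head?) h3
        subst hab
        rw [if_pos rfl]
        have : k ≤ pvLcp as bs := (pvLcp_iff_take k as bs).mpr ⟨by omega, by omega, by simpa using h3⟩
        omega

theorem pvLcp_getElem? {j : Nat} {a b : List Char} (h : j < pvLcp a b) : a[j]? = b[j]? := by
  have h1 := (pvLcp_iff_take (j + 1) a b).mp (by omega)
  have := congrArg (fun l => l[j]?) h1.2.2
  simpa [List.getElem?_take] using this

theorem pvLcp_ge {k : Nat} {a b : List Char} (hka : k ≤ a.length) (hkb : k ≤ b.length)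
    (hpt : ∀ j < k, a[j]? = b[j]?) : k ≤ pvLcp a b := by
  refine (pvLcp_iff_take k a b).mpr ⟨hka, hkb, ?_⟩
  apply List.ext_getElem?
  intro i
  simp only [List.getElem?_take]
  split
  · exact hpt i (by omega)
  · rfl

theorem pvZ_le (s : List Char) (i : Nat) : pvZ s i ≤ s.length - i := by
  have := pvLcp_le_right s (s.drop i)
  simpa [pvZ] using this

theorem pvZ_getElem? {s : List Char} {i j : Nat} (h : j < pvZ s i) : s[j]? = s[i + j]? := by
  have := pvLcp_getElem? (a := s) (b := s.drop i) h
  simpa [List.getElem?_drop] using this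

theorem pvZ_ge {s : List Char} {i k : Nat} (h1 : i + k ≤ s.length)
    (hpt : ∀ j < k, s[j]? = s[i + j]?) : k ≤ pvZ s i := by
  apply pvLcp_ge (by omega) (by simp; omega)
  intro j hj
  simpa [List.getElem?_drop] using hpt j hj

theorem pvZext_eq {s : List Char} {i k : Nat} (hi : 1 ≤ i) (hik : i + k ≤ s.length)
    (hk : k ≤ pvZ s i) : pvZext s i k = pvZ s i := by
  rw [pvZext]
  split
  · next h =>
      obtain ⟨hlt, heq⟩ := h
      apply pvZext_eq hi (by omega)
      -- k + 1 ≤ pvZ s i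
      apply pvZ_ge (by omega)
      intro j hj
      rcases Nat.lt_or_ge j k with hjk | hjk
      · exact pvZ_getElem? (by omega)
      · have hjeq : j = k := by omega
        subst hjeq
        rw [List.getElem?_eq_getElem (by omega), List.getElem?_eq_getElem (by omega)]
        have e1 : s.getD j ' ' = s[j] := List.getD_eq_getElem s ' ' (by omega)
        have e2 : s.getD (i + j) ' ' = s[i + j] := List.getD_eq_getElem s ' ' (by omega)
        rw [e1, e2] at heq
        simpa using heq
  · next h =>
      -- guard false: show k = pvZ s i
      by_contra hne
      have hklt : k < pvZ s i := by omega
      have hge := pvZ_le s i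
      have hrange : i + k < s.length := by omega
      have heq := pvZ_getElem? hklt
      apply h
      refine ⟨hrange, ?_⟩
      have e1 : s.getD k ' ' = s[k] := List.getD_eq_getElem s ' ' (by omega)
      have e2 : s.getD (i + k) ' ' = s[i + k] := List.getD_eq_getElem s ' ' (by omega)
      rw [List.getElem?_eq_getElem (by omega), List.getElem?_eq_getElem (by omega)] at heq
      rw [e1, e2]
      simpa using heq
termination_by s.length - (i + k)
decreasing_by omega

theorem pvZloop_eq_aux (s : List Char) (fuel : Nat) :
    ∀ (z : List Nat) (l r i : Nat), s.length - i ≤ fuel →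
    z.length = s.length → 1 ≤ i →
    (i < r → 1 ≤ l ∧ l < i ∧ r - l ≤ pvZ s l) →
    (∀ j, 1 ≤ j → j < i → PySem.List.pyGetD z (j : Int) 0 = pvZ s j) →
    pvZloop s z l r i = pvF s i := by
  induction fuel with
  | zero =>
      intro z l r i hfuel hz hi hwin hzv
      rw [pvZloop, pvF]
      split
      · next hin => omega
      · rfl
  | succ fuel ih =>
      intro z l r i hfuel hz hi hwin hzv
      rw [pvZloop, pvF]
      split
      · next hin =>
          dsimp only
          generalize he : (if i < r then min (PySem.List.pyGetD z ((i - l : Nat) : Int) 0) (r - i) else 0) = k0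
          have hk0 : k0 ≤ pvZ s i ∧ i + k0 ≤ s.length := by
            subst he
            split
            · next hir =>
                obtain ⟨hl1, hli, hrl⟩ := hwin hir
                have hd := hzv (i - l) (by omega) (by omega)
                rw [hd]
                have hzl := pvZ_le s l
                have hzd := pvZ_le s (i - l)
                constructor
                · apply pvZ_ge (by omega)
                  intro j hj
                  have hj1 : j < pvZ s (i - l) := by omega
                  have hj2 : (i - l) + j < pvZ s l := by omega
                  have e1 := pvZ_getElem? hj1
                  have e2 := pvZ_getElem? hj2
                  rw [show l + ((i - l) + j) = i + j from by omega] at e2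
                  rw [e1, e2]
                · omega
            · next =>
                have := pvZ_le s i
                omega
          have hk : pvZext s i k0 = pvZ s i := pvZext_eq hi hk0.2 hk0.1
          rw [hk]
          split
          · rfl
          · next hik =>
              have hzv' : ∀ j, 1 ≤ j → j < i + 1 →
                  PySem.List.pyGetD (PySem.List.pySetD z (i : Int) (pvZ s i)) (j : Int) 0 = pvZ s j := by
                intro j hj1 hj2
                rw [PySem.List.pyGetD_pySetD_natCast z i j _ _ (by omega)]
                split
                · next hji => subst hji; rfl
                · next hji => exact hzv j hj1 (by omega)
              have hz' : (PySem.List.pySetD z (i : Int) (pvZ s i)).length = s.length := by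
                rw [PySem.List.length_pySetD]; omega
              split
              · next hc =>
                  apply ih _ _ _ _ (by omega) hz' (by omega) _ hzv'
                  intro h1
                  dsimp only at *
                  exact ⟨hi, by omega, by omega⟩
              · next hc =>
                  apply ih _ _ _ _ (by omega) hz' (by omega) _ hzv'
                  intro h1
                  dsimp only at *
                  have hir : i < r := by omega
                  obtain ⟨hl1, hli, hrl⟩ := hwin hir
                  exact ⟨hl1, by omega, hrl⟩
      · rfl

theorem pvZloop_eq (s : List Char) (z : List Nat) (l r i : Nat)
    (hz : z.length = s.length) (hi : 1 ≤ i)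
    (hwin : i < r → 1 ≤ l ∧ l < i ∧ r - l ≤ pvZ s l)
    (hzv : ∀ j, 1 ≤ j → j < i → PySem.List.pyGetD z (j : Int) 0 = pvZ s j) :
    pvZloop s z l r i = pvF s i :=
  pvZloop_eq_aux s (s.length - i) z l r i (le_refl _) hz hi hwin hzv

theorem pvCond_iff {s : List Char} {i : Nat} (hin : i < s.length) :
    (s.take i = (s.drop i).take i) ↔ i ≤ pvZ s i := by
  constructor
  · intro h
    have hlen := congrArg List.length h
    simp at hlen
    exact (pvLcp_iff_take i s (s.drop i)).mpr ⟨by omega, by simp; omega, h⟩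
  · intro h
    exact ((pvLcp_iff_take i s (s.drop i)).mp h).2.2

theorem pvScanA_eq_aux (s : List Char) (fuel : Nat) :
    ∀ (i : Nat), s.length - i ≤ fuel → 1 ≤ i →
    pvScanA s (PySem.List.pyRange (i : Int) (s.length : Int)) = pvF s i := by
  induction fuel with
  | zero =>
      intro i hfuel hi
      rw [PySem.List.pyRange_one_eq_nil (by exact_mod_cast Nat.cast_le.mpr (by omega))]
      rw [pvF]
      rw [if_neg (by omega)]
      rfl
  | succ fuel ih =>
      intro i hfuel hi
      by_cases hin : i < s.length
      · rw [PySem.List.pyRange_one_cons (by exact_mod_cast hin)]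
        rw [pvF, if_pos hin]
        show (if PySem.List.slice s none (some i) = PySem.List.slice s (some i) (some (2 * i)) then
          String.ofList (PySem.List.slice s none (some i)) else pvScanA s (PySem.List.pyRange ((i:Int) + 1) (s.length : Int))) = _
        have e1 : PySem.List.slice s none (some (i : Int)) = s.take i := PySem.List.slice_to_natCast s i
        have e2 : PySem.List.slice s (some (i : Int)) (some (2 * (i : Int))) = (s.drop i).take i := by
          have : (2 * (i : Int)) = ((2 * i : Nat) : Int) := by push_cast; ring
          rw [this, PySem.List.slice_natCast]
          congr 1
          omega
        rw [e1, e2]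
        by_cases hc : s.take i = (s.drop i).take i
        · rw [if_pos hc, if_pos ((pvCond_iff hin).mp hc)]
        · rw [if_neg hc, if_neg (fun h => hc ((pvCond_iff hin).mpr h))]
          have : ((i : Int) + 1) = ((i + 1 : Nat) : Int) := by push_cast; ring
          rw [this]
          exact ih (i + 1) (by omega) (by omega)
      · rw [PySem.List.pyRange_one_eq_nil (by exact_mod_cast Nat.cast_le.mpr (by omega))]
        rw [pvF, if_neg (by omega)]
        rfl

theorem pvReplaceGo : ∀ (fuel : Nat) (l acc : List Char), l.length ≤ fuel →
    PySem.Chars.replace.go [' '] [] fuel l acc = acc.reverse ++ l.filter (fun c => c != ' ')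
  | 0, l, acc, h => by
      have hl : l = [] := by cases l <;> simp_all
      subst hl; simp [PySem.Chars.replace.go]
  | fuel+1, [], acc, h => by simp [PySem.Chars.replace.go]
  | fuel+1, c :: t, acc, h => by
      rw [PySem.Chars.replace.go]
      by_cases hc : c = ' '
      · subst hc
        rw [if_pos (by simp [List.isPrefixOf])]
        rw [pvReplaceGo fuel (List.drop [' '].length (' ' :: t)) ([].reverse ++ acc) (by simpa using h)]
        simp
      · rw [if_neg (by simp [List.isPrefixOf]; exact fun hh => hc hh.symm)]
        rw [pvReplaceGo fuel t (c :: acc) (by simpa using h)]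
        simp [hc]

theorem pvReplaceFilter (cs : List Char) :
    PySem.Chars.replace cs [' '] [] = cs.filter (fun c => c != ' ') := by
  rw [PySem.Chars.replace]
  rw [if_neg (by simp)]
  simpa using pvReplaceGo cs.length cs [] (le_refl _)

theorem pvShift_ne_space (p c : Char) : pvShift p c ≠ ' ' := by
  intro h
  have hmod : (0:Int) ≤ PySem.Int.mod (((PySem.Chars.upperChar c).toNat : Int) - ((PySem.Chars.upperChar p).toNat : Int)) 26 ∧
      PySem.Int.mod (((PySem.Chars.upperChar c).toNat : Int) - ((PySem.Chars.upperChar p).toNat : Int)) 26 < 26 := by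
    unfold PySem.Int.mod
    rw [Int.fmod_eq_emod]
    simp
    constructor
    · exact Int.emod_nonneg _ (by norm_num)
    · exact Int.emod_lt_of_pos _ (by norm_num)
  have := congrArg Char.toNat h
  unfold pvShift at this
  rw [Char.toNat_ofNat] at this
  have hval : ((PySem.Int.mod (((PySem.Chars.upperChar c).toNat : Int) - ((PySem.Chars.upperChar p).toNat : Int)) 26 + 65).toNat) < 91 := by omega
  have hval2 : 65 ≤ ((PySem.Int.mod (((PySem.Chars.upperChar c).toNat : Int) - ((PySem.Chars.upperChar p).toNat : Int)) 26 + 65).toNat) := by omega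
  rw [if_pos (Or.inl (by omega))] at this
  have : (' ').toNat = 32 := rfl
  omega

theorem pvKeyLoopA_eq : ∀ (lst : List (Char × Char)) (acc : List Char),
    pvKeyLoopA lst acc = acc ++ lst.map (fun pc =>
      if PySem.Chars.isalpha pc.1 && PySem.Chars.isalpha pc.2 then pvShift pc.1 pc.2 else ' ')
  | [], acc => by simp [pvKeyLoopA]
  | (p, c) :: rest, acc => by
      simp only [pvKeyLoopA, List.map_cons]
      split
      · next hc => rw [pvKeyLoopA_eq rest _]; simp
      · next hc => rw [pvKeyLoopA_eq rest _]; simp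

theorem pvKey_eq : ∀ (lst : List (Char × Char)),
    (lst.map (fun pc =>
      if PySem.Chars.isalpha pc.1 && PySem.Chars.isalpha pc.2 then pvShift pc.1 pc.2 else ' ')).filter
        (fun c => c != ' ') = pvKeyB lst
  | [] => by simp [pvKeyB]
  | pc :: rest => by
      simp only [List.map_cons, List.filter_cons, pvKeyB, List.filterMap_cons]
      split
      · next hc =>
          rw [if_pos (by simpa using pvShift_ne_space pc.1 pc.2)]
          have := pvKey_eq rest
          simp [pvKeyB] at this
          simp [this]
      · next hc =>
          rw [if_neg (by simp)]
          have := pvKey_eq rest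
          simp [pvKeyB] at this
          simp [this]

-- ===== VERDICT (by name: the statement is the Claim_ definition above) =====
theorem find_vigenere_key_spec : Claim_equal_find_vigenere_key := by
  intro plaintext ciphertext _
  unfold Spec_find_vigenere_key find_vigenere_key find_vigenere_key_alt
  dsimp only
  rw [pvKeyLoopA_eq, List.nil_append, pvReplaceFilter, pvKey_eq]
  rw [pvZloop_eq _ _ _ _ _ (by simp) (le_refl 1)
        (fun h => absurd h (by omega))
        (fun j h1 h2 => absurd (Nat.lt_of_lt_of_le h2 h1) (by omega))]
  have h1 : ((1 : Nat) : Int) = (1 : Int) := by norm_num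
  rw [← h1]
  exact pvScanA_eq_aux _ _ 1 (le_refl _) (le_refl _)
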